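-- pv_equiv track=rewrite | github.com/vaishnn/PacMan | components/library/library.py | _rank_query
-- ===== SOURCE A (Python) =====
-- def _rank_query(dataList, query):
--     lowerQuery = query.lower()
--     matches = [
--         item for item in dataList
--         if lowerQuery in item['name'].lower()
--     ]
--     sortedMatches = sorted(
--         matches,
--         key=lambda item: item['name'].lower().find(lowerQuery)
--     )
--     return sortedMatches
-- ===== SOURCE B (Python) =====
-- def _rank_query(dataList, query):
--     lowerQuery = query.lower()
--     scored = [(item['name'].lower().find(lowerQuery), item) for item in dataList]
--     positions = sorted({p for p, _ in scored if p >= 0})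
--     return [item for p in positions for pp, item in scored if pp == p]
-- ===== Notes on version B (the rewrite author's own statement) =====
-- stated objective: alternative
-- what changed: B replaces the comparison sort of the matching items by a group-by-match-position bucketing: it scores every item once, sorts only the small set of distinct match positions, and emits the buckets in ascending position order (stable by construction).
import Mathlib
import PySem

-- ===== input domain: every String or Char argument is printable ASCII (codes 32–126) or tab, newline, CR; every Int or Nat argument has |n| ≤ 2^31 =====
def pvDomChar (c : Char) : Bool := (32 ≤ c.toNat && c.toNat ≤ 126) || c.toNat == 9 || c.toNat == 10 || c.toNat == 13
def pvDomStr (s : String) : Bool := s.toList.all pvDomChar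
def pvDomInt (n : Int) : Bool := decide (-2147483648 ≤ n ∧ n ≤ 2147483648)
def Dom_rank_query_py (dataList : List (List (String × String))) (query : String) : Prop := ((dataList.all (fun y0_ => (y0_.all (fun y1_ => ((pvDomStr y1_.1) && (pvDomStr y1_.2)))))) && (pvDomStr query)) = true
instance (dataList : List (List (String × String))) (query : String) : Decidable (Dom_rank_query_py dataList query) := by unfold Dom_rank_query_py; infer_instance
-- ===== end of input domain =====

-- B groups the matching items into buckets by match position instead of comparison-sorting them;
-- objective: alternative algorithm (bucket/group-by instead of a stable comparison sort).

-- item['name'] (raises KeyError when absent; Pre_ excludes that — see Pre_rank_query_py)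
def pvName (item : List (String × String)) : String := PySem.Dict.getD (PySem.Dict.mk item) "name" ""

-- ===== PORT A =====
def rank_query_py (dataList : List (List (String × String))) (query : String) : List (List (String × String)) :=
  let lowerQuery := PySem.Str.lower query
  let matched := dataList.filter (fun item => PySem.Str.isIn lowerQuery (PySem.Str.lower (pvName item)))
  PySem.List.sorted matched (fun item => PySem.Str.find (PySem.Str.lower (pvName item)) lowerQuery) false

-- ===== PORT B =====
def rank_query_py_alt (dataList : List (List (String × String))) (query : String) : List (List (String × String)) :=
  let lowerQuery := PySem.Str.lower query
  let scored := dataList.map (fun item => (PySem.Str.find (PySem.Str.lower (pvName item)) lowerQuery, item))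
  let positions := PySem.List.sorted (PySem.Set.ofList ((scored.map Prod.fst).filter (fun p => decide (0 ≤ p)))) (fun p => p) false
  positions.flatMap (fun p => (scored.filter (fun s => s.1 == p)).map Prod.snd)

-- ===== PRECONDITION & SPEC =====
-- Pre_ excludes exactly the inputs where Python A raises KeyError: an item without a 'name' key.
def Pre_rank_query_py (dataList : List (List (String × String))) (query : String) : Prop :=
  ∀ item ∈ dataList, (PySem.Dict.get? (PySem.Dict.mk item) "name").isSome = true
instance (dataList : List (List (String × String))) (query : String) : Decidable (Pre_rank_query_py dataList query) := by unfold Pre_rank_query_py; infer_instance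
def pvWitness_rank_query_py : (List (List (String × String))) × String := ([[("name", "Alpha")], [("name", "bet")]], "a")

def Spec_rank_query_py (dataList : List (List (String × String))) (query : String) (out : List (List (String × String))) : Prop := out = rank_query_py_alt dataList query
instance (dataList : List (List (String × String))) (query : String) (out : List (List (String × String))) : Decidable (Spec_rank_query_py dataList query out) := by unfold Spec_rank_query_py; infer_instance

-- ===== CLAIM (what is proved, stated in full; the proofs are below) =====
def Claim_equal_rank_query_py : Prop := ∀ (dataList : List (List (String × String))) (query : String), Dom_rank_query_py dataList query → Pre_rank_query_py dataList query → Spec_rank_query_py dataList query (rank_query_py dataList query)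

-- ===== LEMMAS AND PROOFS =====

-- insertBy walks past a prefix it does not insert into
theorem insertBy_append_left {α : Type} (before : α → α → Bool) (x : α) (l₁ l₂ : List α)
    (h : ∀ y ∈ l₁, before x y = false) :
    PySem.List.insertBy before x (l₁ ++ l₂) = l₁ ++ PySem.List.insertBy before x l₂ := by
  induction l₁ with
  | nil => simp
  | cons y t ih =>
    simp only [List.cons_append, PySem.List.insertBy, h y (by simp)]
    simp only [Bool.false_eq_true, if_false, List.cons.injEq, true_and]
    exact ih (fun z hz => h z (by simp [hz]))

-- insertBy puts x in front when every element goes after it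
theorem insertBy_eq_cons {α : Type} (before : α → α → Bool) (x : α) (l : List α)
    (h : ∀ y ∈ l, before x y = true) :
    PySem.List.insertBy before x l = x :: l := by
  cases l with
  | nil => rfl
  | cons y t => simp [PySem.List.insertBy, h y (by simp)]

-- inserting x whose key already has a bucket: it lands at the end of its bucket
theorem insertBy_flatMap_mem {α : Type} (key : α → Int) (x : α) (ks : List Int)
    (f : Int → List α)
    (hk : ks.Pairwise (· < ·))
    (hf : ∀ p ∈ ks, ∀ y ∈ f p, key y = p)
    (hx : key x ∈ ks) :
    PySem.List.insertBy (fun a b => decide (key a < key b)) x (ks.flatMap f)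
      = ks.flatMap (fun p => f p ++ if key x == p then [x] else []) := by
  induction ks with
  | nil => simp at hx
  | cons p rest ih =>
    have hrest : rest.Pairwise (· < ·) := hk.of_cons
    have hlt : ∀ q ∈ rest, p < q := by
      intro q hq; exact (List.pairwise_cons.mp hk).1 q hq
    rcases List.mem_cons.mp hx with hxp | hxr
    · -- key x = p : skip bucket f p, then x goes in front of the rest
      simp only [List.flatMap_cons]
      rw [insertBy_append_left _ _ _ _ (by
        intro y hy
        have := hf p (by simp) y hy
        simp [this, hxp])]
      rw [insertBy_eq_cons _ _ _ (by
        intro y hy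
        rcases List.mem_flatMap.mp hy with ⟨q, hq, hyq⟩
        have := hf q (by simp [hq]) y hyq
        have hpq := hlt q hq
        simp [this, hxp]; omega)]
      have hrw : rest.flatMap (fun q => f q ++ if p = q then [x] else [])
          = rest.flatMap f := by
        apply List.flatMap_congr
        intro q hq
        have hpq := hlt q hq
        have : p ≠ q := by omega
        simp [this]
      simp [hxp, hrw]
    · -- key x in the rest: skip bucket f p entirely
      have hpx : p < key x := hlt _ hxr
      simp only [List.flatMap_cons]
      rw [insertBy_append_left _ _ _ _ (by
        intro y hy
        have := hf p (by simp) y hy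
        simp [this]; omega)]
      rw [ih hrest (fun q hq y hy => hf q (by simp [hq]) y hy) hxr]
      have : ¬ (key x == p) = true := by simp; omega
      simp [this]

-- inserting x whose key is new: a fresh singleton bucket appears at the key's sorted position
theorem insertBy_flatMap_not_mem {α : Type} (key : α → Int) (x : α) (ks : List Int)
    (f : Int → List α)
    (hk : ks.Pairwise (· < ·))
    (hf : ∀ p ∈ ks, ∀ y ∈ f p, key y = p)
    (hf0 : f (key x) = [])
    (hx : key x ∉ ks) :
    PySem.List.insertBy (fun a b => decide (key a < key b)) x (ks.flatMap f)
      = (PySem.List.insertBy (fun a b => decide (a < b)) (key x) ks).flatMap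
          (fun p => f p ++ if key x == p then [x] else []) := by
  induction ks with
  | nil => simp [PySem.List.insertBy, hf0]
  | cons p rest ih =>
    have hrest : rest.Pairwise (· < ·) := hk.of_cons
    have hlt : ∀ q ∈ rest, p < q := fun q hq => (List.pairwise_cons.mp hk).1 q hq
    have hne : key x ≠ p := by intro h; exact hx (by simp [h])
    rcases lt_or_gt_of_ne hne with hcase | hcase
    · -- key x < p : new bucket goes in front of everything
      rw [insertBy_eq_cons _ _ _ (by
        intro y hy
        rcases List.mem_flatMap.mp hy with ⟨q, hq, hyq⟩
        have := hf q hq y hyq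
        rcases List.mem_cons.mp hq with h' | h'
        · simp [this, h']; omega
        · have := hlt q h'; simp [‹key y = q›]; omega)]
      rw [insertBy_eq_cons _ _ _ (by
        intro q hq
        rcases List.mem_cons.mp hq with h' | h'
        · simp [h', hcase]
        · have := hlt q h'; simp; omega)]
      have hrw : (p :: rest).flatMap (fun q => f q ++ if key x == q then [x] else [])
          = (p :: rest).flatMap f := by
        apply List.flatMap_congr
        intro q hq
        have : ¬ (key x == q) = true := by
          rcases List.mem_cons.mp hq with h' | h'
          · simp [h']; omega
          · have := hlt q h'; simp; omega
        simp [this]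
      simp only [List.flatMap_cons, hrw, hf0, List.nil_append]
      simp
    · -- p < key x : skip bucket f p
      simp only [List.flatMap_cons]
      rw [insertBy_append_left _ _ _ _ (by
        intro y hy
        have := hf p (by simp) y hy
        simp [this]; omega)]
      rw [ih hrest (fun q hq y hy => hf q (by simp [hq]) y hy) (by intro h; exact hx (by simp [h]))]
      have h2 : PySem.List.insertBy (fun a b => decide (a < b)) (key x) (p :: rest)
          = p :: PySem.List.insertBy (fun a b => decide (a < b)) (key x) rest := by
        simp [PySem.List.insertBy]; omega
      simp [h2, hne]

-- sorted over xs ++ [x] is one insertion into sorted xs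
theorem sorted_append_singleton {α κ : Type} [LT κ] [DecidableLT κ] (xs : List α) (x : α) (key : α → κ) :
    PySem.List.sorted (xs ++ [x]) key false
      = PySem.List.insertBy (fun a b => decide (key a < key b)) x (PySem.List.sorted xs key false) := by
  rw [PySem.List.sorted_eq_foldl_insertBy, PySem.List.sorted_eq_foldl_insertBy, List.foldl_append]
  rfl

-- MAIN: a stable sort by an Int key is the concatenation of the key-buckets in ascending key order
theorem sorted_eq_buckets {α : Type} (xs : List α) (key : α → Int) :
    PySem.List.sorted xs key false
      = (PySem.List.sorted (PySem.Set.ofList (xs.map key)) (fun p => p) false).flatMap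
          (fun p => xs.filter (fun y => key y == p)) := by
  induction xs using List.reverseRecOn with
  | nil => simp [PySem.List.sorted, PySem.Set.ofList]
  | append_singleton xs x ih =>
    have hpair := PySem.List.sorted_ofList_pairwise_lt (xs.map key)
    have hf : ∀ p ∈ PySem.List.sorted (PySem.Set.ofList (xs.map key)) (fun p => p) false,
        ∀ y ∈ xs.filter (fun y => key y == p), key y = p := by
      intro p _ y hy
      simpa using (List.mem_filter.mp hy).2
    have hset : PySem.Set.ofList (xs.map key ++ [key x])
        = PySem.Set.add (PySem.Set.ofList (xs.map key)) (key x) := by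
      rw [PySem.Set.ofList_eq_foldl, PySem.Set.ofList_eq_foldl, List.foldl_append]
      rfl
    have hfa : ∀ p : Int, (xs ++ [x]).filter (fun y => key y == p)
        = xs.filter (fun y => key y == p) ++ (if key x == p then [x] else []) := by
      intro p
      simp [List.filter_append, List.filter_cons]
    rw [sorted_append_singleton, ih, List.map_append]
    simp only [List.map_cons, List.map_nil]
    by_cases hmem : key x ∈ xs.map key
    · have hks : PySem.Set.add (PySem.Set.ofList (xs.map key)) (key x)
          = PySem.Set.ofList (xs.map key) := by
        have hc : PySem.Set.contains (PySem.Set.ofList (xs.map key)) (key x) = true := by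
          simp only [PySem.Set.contains]
          simpa using hmem
        simp only [PySem.Set.add, hc]
        simp
      have hmemks : key x ∈ PySem.List.sorted (PySem.Set.ofList (xs.map key)) (fun p => p) false := by
        rw [PySem.List.mem_sorted]
        exact (PySem.Set.mem_ofList _ _).mpr hmem
      rw [insertBy_flatMap_mem key x _ _ hpair hf hmemks, hset, hks]
      exact List.flatMap_congr fun p _ => (hfa p).symm
    · have hks : PySem.Set.add (PySem.Set.ofList (xs.map key)) (key x)
          = PySem.Set.ofList (xs.map key) ++ [key x] := by
        have hc : PySem.Set.contains (PySem.Set.ofList (xs.map key)) (key x) = false := by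
          simp only [PySem.Set.contains]
          simpa using hmem
        simp only [PySem.Set.add, hc]
        simp
      have hmemks : key x ∉ PySem.List.sorted (PySem.Set.ofList (xs.map key)) (fun p => p) false := by
        rw [PySem.List.mem_sorted]
        intro h
        exact hmem ((PySem.Set.mem_ofList _ _).mp h)
      have hf0 : xs.filter (fun y => key y == key x) = [] := by
        rw [List.filter_eq_nil_iff]
        intro y hy
        simp only [beq_iff_eq]
        intro h
        exact hmem (h ▸ List.mem_map_of_mem hy)
      rw [insertBy_flatMap_not_mem key x _ _ hpair hf hf0 hmemks, hset, hks]
      have hsk : PySem.List.sorted (PySem.Set.ofList (xs.map key) ++ [key x]) (fun p => p) false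
          = PySem.List.insertBy (fun a b => decide (a < b)) (key x)
              (PySem.List.sorted (PySem.Set.ofList (xs.map key)) (fun p => p) false) :=
        sorted_append_singleton _ _ _
      rw [hsk]
      exact List.flatMap_congr fun p _ => (hfa p).symm

-- isIn as a nonnegative find
theorem isIn_eq_find_nonneg (sub s : String) :
    PySem.Str.isIn sub s = decide (0 ≤ PySem.Str.find s sub) := by
  by_cases h : sub.toList <:+: s.toList
  · rw [(PySem.Str.isIn_iff_infix sub s).mpr h,
      decide_eq_true ((PySem.Str.find_nonneg_iff s sub).mpr h)]
  · have h1 : PySem.Str.isIn sub s = false := by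
      rw [Bool.eq_false_iff]
      exact fun hc => h ((PySem.Str.isIn_iff_infix sub s).mp hc)
    have h2 : ¬ 0 ≤ PySem.Str.find s sub := fun hc => h ((PySem.Str.find_nonneg_iff s sub).mp hc)
    rw [h1, decide_eq_false h2]

-- ===== VERDICT (by name: the statement is the Claim_ definition above) =====
theorem rank_query_py_spec : Claim_equal_rank_query_py := by
  intro dataList query _ _
  unfold Spec_rank_query_py rank_query_py rank_query_py_alt
  simp only []
  set lq := PySem.Str.lower query with hlq
  set key : List (String × String) → Int :=
    fun item => PySem.Str.find (PySem.Str.lower (pvName item)) lq with hkey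
  have hfilt : dataList.filter (fun item => PySem.Str.isIn lq (PySem.Str.lower (pvName item)))
      = dataList.filter (fun item => decide (0 ≤ key item)) := by
    apply List.filter_congr
    intro item _
    exact isIn_eq_find_nonneg lq (PySem.Str.lower (pvName item))
  rw [hfilt, sorted_eq_buckets]
  have hpos : ((dataList.map (fun item => (key item, item))).map Prod.fst).filter (fun p => decide (0 ≤ p))
      = (dataList.filter (fun item => decide (0 ≤ key item))).map key := by
    rw [List.map_map, List.filter_map]
    rfl
  rw [hpos]
  apply List.flatMap_congr
  intro p hp
  have hp0 : 0 ≤ p := by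
    rw [PySem.List.mem_sorted] at hp
    rcases List.mem_map.mp ((PySem.Set.mem_ofList _ _).mp hp) with ⟨m, hm, rfl⟩
    simpa using (List.mem_filter.mp hm).2
  have hb : (dataList.map (fun item => (key item, item))).filter (fun s => s.1 == p)
      = (dataList.filter (fun item => key item == p)).map (fun item => (key item, item)) := by
    rw [List.filter_map]
    rfl
  rw [List.filter_filter, hb, List.map_map]
  rw [show (Prod.snd ∘ fun item : List (String × String) => (key item, item)) = id from rfl,
    List.map_id]
  apply List.filter_congr
  intro item _
  rcases eq_or_ne (key item) p with h | h <;> simp [h, hp0]
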